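-- pv_equiv track=rewrite | github.com/sshaayan/Checkers-AI | main.py | centerControl
-- ===== SOURCE A (Python) =====
-- centerEvalMask1 = 0b00000111010000001010000001011100000
--
-- centerEvalMask2 = 0b00000000001100110001100110000000000
--
-- def centerControl(whiteParam, blackParam, kingParam, colorParam):
--     controlVal = 0
--     currPieces = whiteParam
--     if colorParam == "BLACK":
--         currPieces = blackParam
--
--     centerPieces1 = centerEvalMask1 & currPieces
--     centerPieces2 = centerEvalMask2 & currPieces
--     for bit in bin(centerPieces1):
--         controlVal += (1 if bit == '1' else 0)
--     for bit in bin(centerPieces2):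
--         controlVal += (3 if bit == '1' else 0)
--
--     return controlVal
-- ===== SOURCE B (Python) =====
-- centerEvalMask1 = 0b00000111010000001010000001011100000
--
-- centerEvalMask2 = 0b00000000001100110001100110000000000
--
-- def _popcount(n):
--     # Brian Kernighan: one iteration per set bit
--     count = 0
--     while n:
--         n &= n - 1
--         count += 1
--     return count
--
-- def centerControl(whiteParam, blackParam, kingParam, colorParam):
--     currPieces = blackParam if colorParam == "BLACK" else whiteParam
--     return (_popcount(centerEvalMask1 & currPieces)
--             + 3 * _popcount(centerEvalMask2 & currPieces))
-- ===== Notes on version B (the rewrite author's own statement) =====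
-- stated objective: alternative
-- what changed: Replaces scanning every character of bin(mask & pieces) for '1' with Brian Kernighan's popcount loop (n &= n-1 once per set bit), summing popcount(center1) + 3*popcount(center2).
import Mathlib
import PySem

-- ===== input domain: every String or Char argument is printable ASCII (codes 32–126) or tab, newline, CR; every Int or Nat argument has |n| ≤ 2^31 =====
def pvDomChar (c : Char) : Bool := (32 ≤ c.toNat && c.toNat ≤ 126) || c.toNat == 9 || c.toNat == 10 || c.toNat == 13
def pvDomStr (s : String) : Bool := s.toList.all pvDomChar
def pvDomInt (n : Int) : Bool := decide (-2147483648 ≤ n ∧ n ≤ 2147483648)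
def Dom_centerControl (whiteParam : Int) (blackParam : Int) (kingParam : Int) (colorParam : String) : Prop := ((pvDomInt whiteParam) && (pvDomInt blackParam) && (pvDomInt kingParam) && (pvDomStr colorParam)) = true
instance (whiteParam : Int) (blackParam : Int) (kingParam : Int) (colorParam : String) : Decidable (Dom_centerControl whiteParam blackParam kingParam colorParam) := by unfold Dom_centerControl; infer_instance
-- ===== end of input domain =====

-- B replaces A's scan over the characters of bin(mask & pieces) with Brian
-- Kernighan's popcount loop (n &= n-1 once per set bit); same return value.

-- ===== PORT A =====
def centerEvalMask1 : Int := 0b00000111010000001010000001011100000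
def centerEvalMask2 : Int := 0b00000000001100110001100110000000000

def centerControl (whiteParam : Int) (blackParam : Int) (kingParam : Int) (colorParam : String) : Int :=
  let controlVal : Int := 0
  let currPieces : Int := whiteParam
  let currPieces : Int := if colorParam == "BLACK" then blackParam else currPieces
  let centerPieces1 : Int := PySem.Int.band centerEvalMask1 currPieces
  let centerPieces2 : Int := PySem.Int.band centerEvalMask2 currPieces
  let controlVal : Int :=
    (PySem.Int.pyBin centerPieces1).toList.foldl
      (fun acc bit => acc + (if bit = '1' then 1 else 0)) controlVal
  let controlVal : Int :=
    (PySem.Int.pyBin centerPieces2).toList.foldl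
      (fun acc bit => acc + (if bit = '1' then 3 else 0)) controlVal
  controlVal

-- ===== PORT B =====
-- Kernighan popcount; `n` is a masked value, always nonnegative, so the loop
-- state is carried as a Nat (the Python loop would not terminate on negatives).
def kernPop (n : Nat) : Int :=
  if h : n = 0 then 0
  else kernPop (n &&& (n - 1)) + 1
decreasing_by
  exact Nat.lt_of_le_of_lt (Nat.and_le_right) (Nat.sub_lt (Nat.pos_of_ne_zero h) one_pos)

def centerControl_alt (whiteParam : Int) (blackParam : Int) (kingParam : Int) (colorParam : String) : Int :=
  let currPieces : Int := if colorParam == "BLACK" then blackParam else whiteParam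
  kernPop (PySem.Int.band centerEvalMask1 currPieces).toNat
    + 3 * kernPop (PySem.Int.band centerEvalMask2 currPieces).toNat

-- ===== PRECONDITION & SPEC =====
def Spec_centerControl (whiteParam : Int) (blackParam : Int) (kingParam : Int) (colorParam : String) (out : Int) : Prop := out = centerControl_alt whiteParam blackParam kingParam colorParam
instance (whiteParam : Int) (blackParam : Int) (kingParam : Int) (colorParam : String) (out : Int) : Decidable (Spec_centerControl whiteParam blackParam kingParam colorParam out) := by unfold Spec_centerControl; infer_instance

-- ===== CLAIM (what is proved, stated in full; the proofs are below) =====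
def Claim_equal_centerControl : Prop := ∀ (whiteParam : Int) (blackParam : Int) (kingParam : Int) (colorParam : String), Dom_centerControl whiteParam blackParam kingParam colorParam → Spec_centerControl whiteParam blackParam kingParam colorParam (centerControl whiteParam blackParam kingParam colorParam)

-- ===== LEMMAS AND PROOFS =====

-- reference popcount, by halving
def popN (n : Nat) : Nat :=
  if n = 0 then 0 else popN (n / 2) + n % 2

theorem popN_two_mul (k : Nat) : popN (2 * k) = popN k := by
  rcases Nat.eq_zero_or_pos k with h | h
  · simp [h]
  · rw [popN, if_neg (by omega)]
    have h1 : 2 * k / 2 = k := by omega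
    have h2 : 2 * k % 2 = 0 := by omega
    rw [h1, h2]
    omega

theorem popN_two_mul_add_one (k : Nat) : popN (2 * k + 1) = popN k + 1 := by
  rw [popN, if_neg (by omega)]
  have h1 : (2 * k + 1) / 2 = k := by omega
  have h2 : (2 * k + 1) % 2 = 1 := by omega
  rw [h1, h2]

theorem bit_true_eq (k : Nat) : Nat.bit true k = 2 * k + 1 := by
  simp [Nat.bit_val]

theorem bit_false_eq (k : Nat) : Nat.bit false k = 2 * k := by
  simp [Nat.bit_val]

-- clearing the lowest set bit removes exactly one from popN
theorem popN_land_pred (n : Nat) (h : n ≠ 0) : popN (n &&& (n - 1)) + 1 = popN n := by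
  induction n using Nat.strong_induction_on with
  | _ n ih =>
    rcases Nat.even_or_odd n with ⟨k, hk⟩ | ⟨k, hk⟩
    · -- n = 2 * k, k ≥ 1
      have hk' : n = 2 * k := by omega
      have hkpos : k ≠ 0 := by omega
      have hland : n &&& (n - 1) = 2 * (k &&& (k - 1)) := by
        have e1 : n = Nat.bit false k := by rw [bit_false_eq]; omega
        have e2 : n - 1 = Nat.bit true (k - 1) := by rw [bit_true_eq]; omega
        rw [e2, e1, Nat.land_bit, Bool.false_and, bit_false_eq]
      rw [hland, popN_two_mul]
      rw [ih k (by omega) hkpos, hk', popN_two_mul]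
    · -- n = 2 * k + 1
      have hland : n &&& (n - 1) = 2 * k := by
        have e1 : n = Nat.bit true k := by rw [bit_true_eq]; omega
        have e2 : n - 1 = Nat.bit false k := by rw [bit_false_eq]; omega
        rw [e2, e1, Nat.land_bit, Bool.true_and, bit_false_eq, Nat.and_self]
      rw [hland, popN_two_mul, hk, popN_two_mul_add_one]

theorem kernPop_eq_popN (n : Nat) : kernPop n = (popN n : Int) := by
  induction n using Nat.strong_induction_on with
  | _ n ih =>
    rw [kernPop]
    split
    · next h => simp [h, popN]
    · next h =>
      have hlt : n &&& (n - 1) < n :=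
        Nat.lt_of_le_of_lt Nat.and_le_right (Nat.sub_lt (Nat.pos_of_ne_zero h) one_pos)
      rw [ih _ hlt, ← popN_land_pred n h]
      push_cast
      ring

-- counting '1' characters emitted by Nat.toDigitsCore in base 2
theorem count_one_toDigitsCore (f : Nat) :
    ∀ (n : Nat) (l : List Char), n < f →
      (Nat.toDigitsCore 2 f n l).count '1' = popN n + l.count '1' := by
  induction f with
  | zero => intro n l h; omega
  | succ f ih =>
    intro n l h
    rw [Nat.toDigitsCore]
    by_cases hdiv : n / 2 = 0
    · rw [if_pos hdiv]
      have hlt2 : n < 2 := by omega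
      interval_cases n <;> simp [Nat.digitChar, popN] <;> omega
    · rw [if_neg hdiv]
      have hn2 : 2 ≤ n := by omega
      have : n / 2 < f := by
        have := Nat.div_lt_self (by omega : 0 < n) (by omega : 1 < 2)
        omega
      rw [ih (n / 2) _ this]
      have hpop : popN n = popN (n / 2) + n % 2 := by
        rw [popN, if_neg (by omega)]
      rcases Nat.mod_two_eq_zero_or_one n with hm | hm <;>
        simp [hm, Nat.digitChar, hpop] <;> omega

theorem foldl_count (cs : List Char) (w : Int) : ∀ (acc : Int),
    cs.foldl (fun acc bit => acc + (if bit = '1' then w else 0)) acc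
      = acc + w * (cs.count '1' : Int) := by
  induction cs with
  | nil => intro acc; simp
  | cons c cs ih =>
    intro acc
    rw [List.foldl_cons, ih, List.count_cons]
    by_cases h : c = '1' <;> simp [h] <;> ring

theorem count_one_pyBin (m : Int) (hm : 0 ≤ m) :
    (PySem.Int.pyBin m).toList.count '1' = popN m.toNat := by
  rw [PySem.Int.toList_pyBin]
  unfold PySem.Int.toBinChars0b
  rw [if_neg (by omega)]
  rw [Nat.toDigits]
  simp [count_one_toDigitsCore (m.toNat + 1) m.toNat [] (by omega)]

-- ===== VERDICT (by name: the statement is the Claim_ definition above) =====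
theorem centerControl_spec : Claim_equal_centerControl := by
  intro whiteParam blackParam kingParam colorParam _
  unfold Spec_centerControl centerControl centerControl_alt
  simp only []
  rw [foldl_count, foldl_count]
  have h1 : (0:Int) ≤ PySem.Int.band centerEvalMask1
      (if colorParam == "BLACK" then blackParam else whiteParam) :=
    PySem.Int.band_nonneg_of_nonneg_left _ (by norm_num [centerEvalMask1])
  have h2 : (0:Int) ≤ PySem.Int.band centerEvalMask2
      (if colorParam == "BLACK" then blackParam else whiteParam) :=
    PySem.Int.band_nonneg_of_nonneg_left _ (by norm_num [centerEvalMask2])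
  rw [count_one_pyBin _ h1, count_one_pyBin _ h2, kernPop_eq_popN, kernPop_eq_popN]
  ring
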